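-- pv_equiv track=rewrite | github.com/saiberz/P0 | Task4.py | get_text_numbers
-- ===== SOURCE A (Python) =====
-- def get_text_numbers(text_records):
--     text_numbers = []
--     for text_record in text_records:
--         if(text_record[0] not in text_numbers):
--             text_numbers.append(text_record[0])
--         if(text_record[1] not in text_numbers):
--             text_numbers.append(text_record[1])
--     return sorted(text_numbers)
-- ===== SOURCE B (Python) =====
-- def get_text_numbers(text_records):
--     values = []
--     for text_record in text_records:
--         values.append(text_record[0])
--         values.append(text_record[1])
--     out = []
--     for v in sorted(values):
--         if not out or out[-1] != v:
--             out.append(v)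
--     return out
-- ===== Notes on version B (the rewrite author's own statement) =====
-- stated objective: alternative
-- what changed: B collects all values (duplicates included), sorts once, and removes duplicates in a single adjacent-equality pass over the sorted list, instead of A's per-element membership scan of the accumulator followed by a sort.
import Mathlib
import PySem

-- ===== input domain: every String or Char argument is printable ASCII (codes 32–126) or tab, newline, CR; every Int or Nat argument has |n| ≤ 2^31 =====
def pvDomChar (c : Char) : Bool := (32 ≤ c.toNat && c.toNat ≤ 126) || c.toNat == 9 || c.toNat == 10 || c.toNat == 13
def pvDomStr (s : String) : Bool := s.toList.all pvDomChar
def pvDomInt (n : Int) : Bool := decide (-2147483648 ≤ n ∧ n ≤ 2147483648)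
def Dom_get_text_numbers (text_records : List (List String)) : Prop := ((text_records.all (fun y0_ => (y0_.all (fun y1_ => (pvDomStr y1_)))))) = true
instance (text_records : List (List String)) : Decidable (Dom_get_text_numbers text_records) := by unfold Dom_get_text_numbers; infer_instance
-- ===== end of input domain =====

-- B sorts the full value list (duplicates included) once and removes duplicates in a single
-- adjacent-equality pass, instead of A's per-element membership scan followed by a sort.

-- ===== PORT A =====
-- text_record[0] / text_record[1] are ported with pyGet? (none = IndexError); the .getD "" is
-- unreachable inside Pre_, which excludes exactly the records shorter than 2 (where Python raises).
def get_text_numbers (text_records : List (List String)) : List String :=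
  let text_numbers := text_records.foldl (fun acc r =>
    let acc := if ((PySem.List.pyGet? r 0).getD "") ∈ acc then acc else acc ++ [(PySem.List.pyGet? r 0).getD ""]
    let acc := if ((PySem.List.pyGet? r 1).getD "") ∈ acc then acc else acc ++ [(PySem.List.pyGet? r 1).getD ""]
    acc) []
  PySem.List.sorted text_numbers (fun x => x) false

-- ===== PORT B =====
def get_text_numbers_alt (text_records : List (List String)) : List String :=
  let values := text_records.foldl (fun acc r =>
    acc ++ [(PySem.List.pyGet? r 0).getD ""] ++ [(PySem.List.pyGet? r 1).getD ""]) []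
  (PySem.List.sorted values (fun x => x) false).foldl (fun out v =>
    if out = [] ∨ out.getLast? ≠ some v then out ++ [v] else out) []

-- ===== PRECONDITION & SPEC =====
-- Pre_ excludes exactly the inputs with a record of length < 2, on which Python A raises IndexError.
def Pre_get_text_numbers (text_records : List (List String)) : Prop :=
  ∀ r ∈ text_records, 2 ≤ r.length
instance (text_records : List (List String)) : Decidable (Pre_get_text_numbers text_records) := by unfold Pre_get_text_numbers; infer_instance
def pvWitness_get_text_numbers : List (List String) := [["b", "a"], ["a", "c"]]

def Spec_get_text_numbers (text_records : List (List String)) (out : List String) : Prop := out = get_text_numbers_alt text_records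
instance (text_records : List (List String)) (out : List String) : Decidable (Spec_get_text_numbers text_records out) := by unfold Spec_get_text_numbers; infer_instance

-- ===== CLAIM (what is proved, stated in full; the proofs are below) =====
def Claim_equal_get_text_numbers : Prop := ∀ (text_records : List (List String)), Dom_get_text_numbers text_records → Pre_get_text_numbers text_records → Spec_get_text_numbers text_records (get_text_numbers text_records)

-- ===== LEMMAS AND PROOFS =====

-- the value read by text_record[i] (total form used by both ports)
def pvVal (r : List String) (i : Int) : String := (PySem.List.pyGet? r i).getD ""

-- all values in record order (duplicates included)
def pvFlat (rs : List (List String)) : List String :=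
  rs.flatMap (fun r => [pvVal r 0, pvVal r 1])

-- A's accumulator step
def pvStepA (acc : List String) (r : List String) : List String :=
  let acc := if pvVal r 0 ∈ acc then acc else acc ++ [pvVal r 0]
  let acc := if pvVal r 1 ∈ acc then acc else acc ++ [pvVal r 1]
  acc

-- B's dedup step
def pvStepB (out : List String) (v : String) : List String :=
  if out = [] ∨ out.getLast? ≠ some v then out ++ [v] else out

theorem get_text_numbers_eq (rs : List (List String)) :
    get_text_numbers rs = PySem.List.sorted (rs.foldl pvStepA []) (fun x => x) false := rfl

theorem get_text_numbers_alt_eq (rs : List (List String)) :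
    get_text_numbers_alt rs =
      (PySem.List.sorted (rs.foldl (fun acc r => acc ++ [pvVal r 0] ++ [pvVal r 1]) []) (fun x => x) false).foldl pvStepB [] := rfl

theorem mem_stepA (acc r : List String) (x : String) :
    x ∈ pvStepA acc r ↔ x ∈ acc ∨ x = pvVal r 0 ∨ x = pvVal r 1 := by
  dsimp only [pvStepA]
  split_ifs <;> simp_all <;> aesop

theorem mem_foldl_stepA (rs : List (List String)) (acc : List String) (x : String) :
    x ∈ rs.foldl pvStepA acc ↔ x ∈ acc ∨ x ∈ pvFlat rs := by
  induction rs generalizing acc with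
  | nil => simp [pvFlat]
  | cons r t ih =>
    rw [List.foldl_cons, ih]
    simp [pvFlat, mem_stepA, List.flatMap_cons]
    aesop

theorem nodup_stepA (acc r : List String) (h : acc.Nodup) : (pvStepA acc r).Nodup := by
  dsimp only [pvStepA]
  split_ifs with h1 h2 h3
  · exact h
  · exact List.Nodup.append h (by simp) (by intro a ha hb; simp at hb; exact h2 (hb ▸ ha))
  · exact List.Nodup.append h (by simp) (by intro a ha hb; simp at hb; exact h1 (hb ▸ ha))
  · simp only [List.mem_append, List.mem_singleton, not_or] at h3
    refine List.Nodup.append (List.Nodup.append h (by simp) ?_) (by simp) ?_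
    · intro a ha hb; simp at hb; exact h1 (hb ▸ ha)
    · intro a ha hb; simp at hb; subst hb
      rcases List.mem_append.1 ha with ha | ha
      · exact h3.1 ha
      · simp at ha; exact h3.2 ha

theorem nodup_foldl_stepA (rs : List (List String)) (acc : List String) (h : acc.Nodup) :
    (rs.foldl pvStepA acc).Nodup := by
  induction rs generalizing acc with
  | nil => exact h
  | cons r t ih => exact ih _ (nodup_stepA acc r h)

theorem le_getLast_of_pairwise {l : List String} (hp : l.Pairwise (· < ·))
    {a : String} (ha : a ∈ l) (h : l ≠ []) : a ≤ l.getLast h := by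
  induction l with
  | nil => simp at ha
  | cons x t ih =>
    rcases List.mem_cons.1 ha with rfl | hat
    · cases t with
      | nil => simp [List.getLast]
      | cons y u =>
        rw [List.getLast_cons (by simp)]
        exact le_of_lt ((List.pairwise_cons.1 hp).1 _ (List.getLast_mem (by simp)))
    · have ht : t ≠ [] := by rintro rfl; simp at hat
      have := ih (List.pairwise_cons.1 hp).2 hat ht
      rw [List.getLast_cons ht]
      exact this

-- the B dedup loop over a ≤-sorted list: result strictly increasing, same members
theorem foldl_stepB_invariant (s : List String) :
    ∀ (acc : List String), s.Pairwise (· ≤ ·) → acc.Pairwise (· < ·) →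
      (∀ a ∈ acc, ∀ y ∈ s, a ≤ y) →
      (s.foldl pvStepB acc).Pairwise (· < ·) ∧
      (∀ x, x ∈ s.foldl pvStepB acc ↔ x ∈ acc ∨ x ∈ s) := by
  induction s with
  | nil => intro acc _ hpa _; exact ⟨hpa, by simp⟩
  | cons v t ih =>
    intro acc hps hpa hle
    have hps' := (List.pairwise_cons.1 hps).2
    have hvle : ∀ y ∈ t, v ≤ y := (List.pairwise_cons.1 hps).1
    rw [List.foldl_cons]
    by_cases hc : acc = [] ∨ acc.getLast? ≠ some v
    · have hstep : pvStepB acc v = acc ++ [v] := by unfold pvStepB; rw [if_pos hc]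
      rw [hstep]
      have hlt : ∀ a ∈ acc, a < v := by
        intro a ha
        have hle' : a ≤ v := hle a ha v (by simp)
        rcases lt_or_eq_of_le hle' with hx | rfl
        · exact hx
        · exfalso
          have hne : acc ≠ [] := by rintro rfl; simp at ha
          rcases hc with hc | hc
          · exact hne hc
          · have h1 : a ≤ acc.getLast hne := le_getLast_of_pairwise hpa ha hne
            have h2 : acc.getLast hne ≤ a := hle _ (List.getLast_mem hne) a (by simp)
            have h3 : acc.getLast? = some a := by
              rw [List.getLast?_eq_some_getLast (h := hne)]
              exact congrArg some (le_antisymm h2 h1)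
            exact hc h3
      have hpa' : (acc ++ [v]).Pairwise (· < ·) := by
        rw [List.pairwise_append]
        exact ⟨hpa, by simp, by simpa using hlt⟩
      have hle' : ∀ a ∈ acc ++ [v], ∀ y ∈ t, a ≤ y := by
        intro a ha y hy
        rcases List.mem_append.1 ha with ha | ha
        · exact hle a ha y (by simp [hy])
        · simp at ha; subst ha; exact hvle y hy
      obtain ⟨h1, h2⟩ := ih (acc ++ [v]) hps' hpa' hle'
      refine ⟨h1, fun x => ?_⟩
      rw [h2]; simp; tauto
    · have hstep : pvStepB acc v = acc := by unfold pvStepB; rw [if_neg hc]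
      rw [hstep]
      rw [not_or, not_ne_iff] at hc
      have hne : acc ≠ [] := hc.1
      have hvmem : v ∈ acc := by
        have hl := hc.2
        rw [List.getLast?_eq_some_getLast (h := hne)] at hl
        have hv : acc.getLast hne = v := Option.some.inj hl
        rw [← hv]; exact List.getLast_mem hne
      have hle' : ∀ a ∈ acc, ∀ y ∈ t, a ≤ y := fun a ha y hy => hle a ha y (by simp [hy])
      obtain ⟨h1, h2⟩ := ih acc hps' hpa hle'
      refine ⟨h1, fun x => ?_⟩
      rw [h2]; simp
      constructor
      · tauto
      · rintro (h | rfl | h)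
        · exact Or.inl h
        · exact Or.inl hvmem
        · exact Or.inr h

theorem foldl_append_pvFlat (rs : List (List String)) :
    rs.foldl (fun acc r => acc ++ [pvVal r 0] ++ [pvVal r 1]) [] = pvFlat rs := by
  have h : ∀ (acc : List String),
      rs.foldl (fun acc r => acc ++ [pvVal r 0] ++ [pvVal r 1]) acc = acc ++ pvFlat rs := by
    induction rs with
    | nil => intro acc; simp [pvFlat]
    | cons r t ih => intro acc; simp [pvFlat, List.flatMap_def]
  simpa using h []

-- ===== VERDICT (by name: the statement is the Claim_ definition above) =====
theorem get_text_numbers_spec : Claim_equal_get_text_numbers := by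
  intro rs _ _
  unfold Spec_get_text_numbers
  rw [get_text_numbers_eq, get_text_numbers_alt_eq, foldl_append_pvFlat]
  set accA := rs.foldl pvStepA [] with hA
  set s := PySem.List.sorted (pvFlat rs) (fun x => x) false with hs
  have hps : s.Pairwise (· ≤ ·) := by
    have := PySem.List.sorted_pairwise (xs := pvFlat rs) (key := fun x => x)
    simpa using this
  obtain ⟨hp, hm⟩ := foldl_stepB_invariant s [] hps (by simp) (by simp)
  refine (PySem.List.sorted_eq_of_perm_of_pairwise_lt accA _ (fun x => x) ?_ ?_)
  · -- (s.foldl pvStepB []).Perm accA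
    refine (List.perm_ext_iff_of_nodup ?_ ?_).2 ?_
    · exact List.Pairwise.imp ne_of_lt hp
    · exact nodup_foldl_stepA rs [] (by simp)
    · intro x
      rw [hm x, mem_foldl_stepA]
      simp [hs, PySem.List.mem_sorted]
  · simpa using hp
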